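-- pv_equiv track=rewrite | github.com/Sassa-nf/pi | rabbit_hole/a.py | loops
-- ===== SOURCE A (Python) =====
-- def first(s):
--    for p in s:
--       return p
--    return None
--
-- def loops(g):
--    stack = []     # list of nodes currently reachable from some loops
--    seen = {}      # map of nodes to their position in stack
--    traversal = [] # sets of outbound edges still to traverse
--    loop = []      # indices of loop start on stack
--    sizes = {} # node to longest suffix length
--    while g:
--       p = first(g)
--       loop.append(len(stack))
--       seen[p] = len(stack)
--       traversal.append((p, len(stack), g.pop(p)))
--       stack.append(p)
--       sizes[p] = 0
--       while traversal:
--          i, l, s = traversal[-1]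
--          if s:
--             p = first(s)
--             s.remove(p)
--             if p not in seen:
--                if p in sizes: # traversed before in some other branch, and now we know everything about it
--                   traversal.append((p, loop[-1]+1, set()))
--                   continue
--                loop.append(len(stack))
--                seen[p] = len(stack)
--                traversal.append((p, len(stack), g.pop(p)))
--                stack.append(p)
--                sizes[p] = 0
--                continue
--             i = seen[p]
--             while loop[-1] > i:
--                loop.pop()
--             continue
--          traversal.pop()
--          if l > loop[-1]:
--             # assert: traversal is non-empty
--             p, _, _ = traversal[-1]
--             sizes[p] = max(sizes[p], sizes[i])
--             continue
--          # now we are popping a loop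
--          b = loop.pop()
--          sz = len(stack) - b + max([sizes[i] for i in stack[b:]])
--          for i in stack[b:]:
--             sizes[i] = sz
--             seen.pop(i)
--
--          stack[b:] = []
--          if traversal:
--             p, _, _ = traversal[-1]
--             sizes[p] = max(sizes[p], sz)
--    return max(sizes.values())
-- ===== SOURCE B (Python) =====
-- def loops(g):
--    seen = {}  # node -> its position on the DFS stack (only while on stack)
--    stack = []
--    loop = []  # positions where still-open (possibly cyclic) segments start
--    sizes = {} # node -> longest collapsed-chain length known so far
--    def dfs(v, edges):
--       base = len(stack)
--       loop.append(base)
--       seen[v] = base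
--       stack.append(v)
--       sizes[v] = 0
--       for p in edges:
--          if p in seen:
--             while loop[-1] > seen[p]:
--                loop.pop()
--             continue
--          if p not in sizes:
--             dfs(p, g.pop(p))
--          sizes[v] = max(sizes[v], sizes[p])
--       if loop[-1] == base:
--          loop.pop()
--          sz = len(stack) - base + max(sizes[i] for i in stack[base:])
--          for i in stack[base:]:
--             sizes[i] = sz
--             seen.pop(i)
--          del stack[base:]
--    while g:
--       v = next(iter(g))
--       dfs(v, g.pop(v))
--    return max(sizes.values())
-- ===== Notes on version B (the rewrite author's own statement) =====
-- stated objective: simpler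
-- what changed: A's hand-maintained traversal stack of (node, stack-position, pending-edge-set) frames with sentinel re-visit entries is replaced by a direct recursive dfs whose call stack and return path carry the same information; like A, B empties its dict argument in place.
import Mathlib
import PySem

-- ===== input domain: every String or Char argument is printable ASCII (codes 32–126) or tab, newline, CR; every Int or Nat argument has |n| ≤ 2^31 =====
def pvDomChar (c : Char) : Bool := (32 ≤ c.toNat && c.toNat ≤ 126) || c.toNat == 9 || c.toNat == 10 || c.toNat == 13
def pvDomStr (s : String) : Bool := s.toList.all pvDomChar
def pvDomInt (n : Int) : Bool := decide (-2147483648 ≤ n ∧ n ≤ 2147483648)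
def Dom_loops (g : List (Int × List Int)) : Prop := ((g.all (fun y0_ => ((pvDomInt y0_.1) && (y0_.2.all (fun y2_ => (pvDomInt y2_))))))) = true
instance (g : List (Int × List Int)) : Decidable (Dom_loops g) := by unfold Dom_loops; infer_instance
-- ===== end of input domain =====

-- B restructures A's explicit traversal-stack machine as a direct recursive DFS (objective: simpler);
-- like A, the Python B consumes its dict argument destructively (g is empty on return) — the theorems
-- below are about the RETURN value.

-- Both Pythons receive g as dict[int, set[int]]: the association-list argument dict-ified
-- (later duplicate key wins, each value a set = its distinct elements in order).
def pvGraphOf (g : List (Int × List Int)) : PySem.Dict Int (List Int) :=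
  g.foldl (fun d kv => d.insert kv.1 (PySem.Set.ofList kv.2)) PySem.Dict.empty

-- The mutable state both Pythons thread: the remaining graph, seen (node -> stack position),
-- the node stack, the `loop` list (top at HEAD here), and sizes.
structure LoopSt where
  g : PySem.Dict Int (List Int)
  seen : PySem.Dict Int Int
  stack : List Int
  loopL : List Int
  sizes : PySem.Dict Int Int

-- `while loop[-1] > i: loop.pop()` (this inner while appears verbatim in both Pythons)
def popLoop (i : Int) : List Int → List Int
  | [] => []
  | b :: r => if i < b then popLoop i r else b :: r

-- ===== PORT A =====

-- step budgets for the fuelled loops below: the fuel handed to each loop is one more than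
-- a quantity every iteration strictly decreases, so the guard never fires on any input
def pvWG (d : PySem.Dict Int (List Int)) : Nat := (d.items.map (fun kv => kv.2.length)).sum
def pvWT (tr : List (Int × Int × List Int)) : Nat := (tr.map (fun e => e.2.2.length)).sum
def pvMI (st : LoopSt) (tr : List (Int × Int × List Int)) : Nat :=
  2 * (pvWG st.g + pvWT tr) + tr.length

-- A's inner `while traversal:` loop, step for step (traversal top at HEAD; the Nat argument is
-- loop fuel, a totalization guard only; the raising spots Python can only hit outside Pre_ —
-- g.pop on a missing key, loop[-1]/traversal[-1] on an empty list, max([]) — are totalized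
-- with getD/headD/skip).
def innerAF : Nat → LoopSt → List (Int × Int × List Int) → LoopSt
  | 0, st, _ => st
  | fuel + 1, st, tr =>
    match tr with
    | [] => st
    | (i, l, s) :: rest =>
      match s with
      | p :: s' =>
        if st.seen.contains p then
          innerAF fuel { st with loopL := popLoop (st.seen.getD p 0) st.loopL } ((i, l, s') :: rest)
        else if st.sizes.contains p then
          innerAF fuel st ((p, st.loopL.headD 0 + 1, ([] : List Int)) :: (i, l, s') :: rest)
        else
          innerAF fuel { st with g := st.g.erase p,
                                 seen := st.seen.insert p (st.stack.length : Int),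
                                 stack := st.stack ++ [p],
                                 loopL := (st.stack.length : Int) :: st.loopL,
                                 sizes := st.sizes.insert p 0 }
                 ((p, (st.stack.length : Int), st.g.getD p []) :: (i, l, s') :: rest)
      | [] =>
        match st.loopL with
        | b :: loopRest =>
          if b < l then
            match rest with
            | (q, ql, qs) :: rtail =>
              innerAF fuel { st with sizes := st.sizes.insert q (max (st.sizes.getD q 0) (st.sizes.getD i 0)) } ((q, ql, qs) :: rtail)
            | [] => innerAF fuel st []
          else
            -- popping a loop: b = loop.pop()
            let suffix := st.stack.drop b.toNat
            let sz : Int := (st.stack.length : Int) - b +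
              ((PySem.List.max? (suffix.map (fun j => st.sizes.getD j 0)) (fun x => x)).getD 0)
            let sizes' := suffix.foldl (fun d j => d.insert j sz) st.sizes
            let seen' := suffix.foldl (fun d j => d.erase j) st.seen
            match rest with
            | (q, ql, qs) :: rtail =>
              innerAF fuel { st with seen := seen', stack := st.stack.take b.toNat, loopL := loopRest,
                                     sizes := sizes'.insert q (max (sizes'.getD q 0) sz) } ((q, ql, qs) :: rtail)
            | [] =>
              innerAF fuel { st with seen := seen', stack := st.stack.take b.toNat, loopL := loopRest,
                                     sizes := sizes' } []
        | [] =>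
          -- loop[-1] on an empty list (unreachable from the initial state): no collapse
          match rest with
          | (q, ql, qs) :: rtail =>
            innerAF fuel { st with sizes := st.sizes.insert q (max (st.sizes.getD q 0) (st.sizes.getD i 0)) } ((q, ql, qs) :: rtail)
          | [] => innerAF fuel st []

-- A's outer `while g:` loop (fuel: one key of g is consumed per iteration)
def outerAF : Nat → LoopSt → LoopSt
  | 0, st => st
  | n + 1, st =>
    match st.g.items with
    | [] => st
    | (p, es) :: _ =>
      outerAF n (innerAF
        (pvMI { st with g := st.g.erase p,
                        seen := st.seen.insert p (st.stack.length : Int),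
                        stack := st.stack ++ [p],
                        loopL := (st.stack.length : Int) :: st.loopL,
                        sizes := st.sizes.insert p 0 } [(p, (st.stack.length : Int), es)] + 1)
        { st with g := st.g.erase p,
                  seen := st.seen.insert p (st.stack.length : Int),
                  stack := st.stack ++ [p],
                  loopL := (st.stack.length : Int) :: st.loopL,
                  sizes := st.sizes.insert p 0 }
        [(p, (st.stack.length : Int), es)])

def loops (g : List (Int × List Int)) : Int :=
  let st := outerAF (pvGraphOf g).size ⟨pvGraphOf g, PySem.Dict.empty, [], [], PySem.Dict.empty⟩
  (PySem.List.max? st.sizes.values (fun x => x)).getD 0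

-- ===== PORT B =====

-- push v on the DFS stack (dfs prologue in Source B)
def pushNode (st : LoopSt) (v : Int) : LoopSt :=
  { st with seen := st.seen.insert v (st.stack.length : Int),
            stack := st.stack ++ [v],
            loopL := (st.stack.length : Int) :: st.loopL,
            sizes := st.sizes.insert v 0 }

-- dfs epilogue in Source B: collapse the finished loop when this call opened it
def epilogueB (base : Int) (st : LoopSt) : LoopSt :=
  match st.loopL with
  | b :: loopRest =>
    if b == base then
      let suffix := st.stack.drop b.toNat
      let sz : Int := (st.stack.length : Int) - b +
        ((PySem.List.max? (suffix.map (fun j => st.sizes.getD j 0)) (fun x => x)).getD 0)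
      { st with seen := suffix.foldl (fun d j => d.erase j) st.seen,
                stack := st.stack.take b.toNat,
                loopL := loopRest,
                sizes := suffix.foldl (fun d j => d.insert j sz) st.sizes }
    else st
  | [] => st  -- loop[-1] on an empty list (unreachable from the initial state)

mutual
-- Source B's dfs(v, edges) (the Nat argument is recursion fuel, a totalization guard only)
def dfsB : Nat → LoopSt → Int → List Int → LoopSt
  | 0, st, _, _ => st
  | fuel + 1, st, v, es => epilogueB (st.stack.length : Int) (goB fuel (pushNode st v) v es)

-- Source B's `for p in edges:` loop body
def goB : Nat → LoopSt → Int → List Int → LoopSt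
  | 0, st, _, _ => st
  | _ + 1, st, _, [] => st
  | fuel + 1, st, v, p :: rest =>
    if st.seen.contains p then
      goB fuel { st with loopL := popLoop (st.seen.getD p 0) st.loopL } v rest
    else
      let st' := if st.sizes.contains p then st
                 else dfsB fuel { st with g := st.g.erase p } p (st.g.getD p [])
      goB fuel { st' with sizes := st'.sizes.insert v (max (st'.sizes.getD v 0) (st'.sizes.getD p 0)) } v rest
end

-- Source B's `while g:` loop (fuel: one key of g is consumed per iteration; the dfs fuel per
-- call is recomputed from the remaining graph)
def outerBF : Nat → LoopSt → LoopSt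
  | 0, st => st
  | n + 1, st =>
    match st.g.items with
    | [] => st
    | (v, es) :: _ =>
      outerBF n (dfsB (2 * pvWG st.g + 2 * st.g.size) { st with g := st.g.erase v } v es)

def loops_alt (g : List (Int × List Int)) : Int :=
  let st := outerBF (pvGraphOf g).size ⟨pvGraphOf g, PySem.Dict.empty, [], [], PySem.Dict.empty⟩
  (PySem.List.max? st.sizes.values (fun x => x)).getD 0

-- ===== PRECONDITION & SPEC =====

-- Pre_: Python A raises KeyError (g.pop) as soon as a traversed edge leaves the dict's key
-- set, and ValueError (max of an empty sequence) on an empty dict; Pre_ admits exactly the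
-- nonempty graphs all of whose edges point at keys.
def Pre_loops (g : List (Int × List Int)) : Prop :=
  g ≠ [] ∧ ∀ kv ∈ (pvGraphOf g).items, ∀ x ∈ kv.2, (pvGraphOf g).contains x = true

instance (g : List (Int × List Int)) : Decidable (Pre_loops g) := by unfold Pre_loops; infer_instance

def pvWitness_loops : (List (Int × List Int)) := [(1, [2, 1]), (2, [1]), (3, [])]

def Spec_loops (g : List (Int × List Int)) (out : Int) : Prop := out = loops_alt g
instance (g : List (Int × List Int)) (out : Int) : Decidable (Spec_loops g out) := by unfold Spec_loops; infer_instance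

-- ===== CLAIM (what is proved, stated in full; the proofs are below) =====
def Claim_equal_loops : Prop := ∀ (g : List (Int × List Int)), Dom_loops g → Pre_loops g → Spec_loops g (loops g)

-- ===== LEMMAS AND PROOFS =====

-- termination lemmas for the proof-side machine innerR below
theorem pvSumFilter_le (f : Int × List Int → Bool) (xs : List (Int × List Int)) :
    ((xs.filter f).map (fun kv => kv.2.length)).sum ≤ (xs.map (fun kv => kv.2.length)).sum := by
  induction xs with
  | nil => simp
  | cons kv t ih =>
    rw [List.filter_cons]
    by_cases h : f kv
    · simp [h]; omega
    · simp [h]; omega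

theorem pvWG_erase_getD_le (d : PySem.Dict Int (List Int)) (p : Int) :
    pvWG (d.erase p) + (d.getD p []).length ≤ pvWG d := by
  rcases d with ⟨xs⟩
  simp only [pvWG, PySem.Dict.erase, PySem.Dict.getD, PySem.Dict.get?]
  induction xs with
  | nil => simp
  | cons kv t ih =>
    rw [List.filter_cons, List.find?_cons]
    by_cases h : (kv.1 == p) = true
    · simp only [h, Bool.not_true, Bool.false_eq_true, if_false, List.map_cons, List.sum_cons,
        Option.map_some, Option.getD_some]
      have := pvSumFilter_le (fun kv => !(kv.1 == p)) t
      omega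
    · simp only [Bool.not_eq_true] at h
      simp only [h, Bool.not_false, if_true, List.map_cons, List.sum_cons]
      omega

theorem pvSizeErase_le (d : PySem.Dict Int (List Int)) (p : Int) :
    (d.erase p).size ≤ d.size := by
  simpa [PySem.Dict.erase, PySem.Dict.size] using List.length_filter_le _ _

-- the proof-side twin of innerAF: the same machine by well-founded recursion (no fuel)
def innerR (st : LoopSt) (tr : List (Int × Int × List Int)) : LoopSt :=
  match tr with
  | [] => st
  | (i, l, s) :: rest =>
    match s with
    | p :: s' =>
      if st.seen.contains p then
        innerR { st with loopL := popLoop (st.seen.getD p 0) st.loopL } ((i, l, s') :: rest)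
      else if st.sizes.contains p then
        innerR st ((p, st.loopL.headD 0 + 1, ([] : List Int)) :: (i, l, s') :: rest)
      else
        innerR { st with g := st.g.erase p,
                         seen := st.seen.insert p (st.stack.length : Int),
                         stack := st.stack ++ [p],
                         loopL := (st.stack.length : Int) :: st.loopL,
                         sizes := st.sizes.insert p 0 }
               ((p, (st.stack.length : Int), st.g.getD p []) :: (i, l, s') :: rest)
    | [] =>
      match st.loopL with
      | b :: loopRest =>
        if b < l then
          match rest with
          | (q, ql, qs) :: rtail =>
            innerR { st with sizes := st.sizes.insert q (max (st.sizes.getD q 0) (st.sizes.getD i 0)) } ((q, ql, qs) :: rtail)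
          | [] => innerR st []
        else
          let suffix := st.stack.drop b.toNat
          let sz : Int := (st.stack.length : Int) - b +
            ((PySem.List.max? (suffix.map (fun j => st.sizes.getD j 0)) (fun x => x)).getD 0)
          let sizes' := suffix.foldl (fun d j => d.insert j sz) st.sizes
          let seen' := suffix.foldl (fun d j => d.erase j) st.seen
          match rest with
          | (q, ql, qs) :: rtail =>
            innerR { st with seen := seen', stack := st.stack.take b.toNat, loopL := loopRest,
                             sizes := sizes'.insert q (max (sizes'.getD q 0) sz) } ((q, ql, qs) :: rtail)
          | [] =>
            innerR { st with seen := seen', stack := st.stack.take b.toNat, loopL := loopRest,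
                             sizes := sizes' } []
      | [] =>
        match rest with
        | (q, ql, qs) :: rtail =>
          innerR { st with sizes := st.sizes.insert q (max (st.sizes.getD q 0) (st.sizes.getD i 0)) } ((q, ql, qs) :: rtail)
        | [] => innerR st []
  termination_by (pvWG st.g + pvWT tr, tr.length)
  decreasing_by
  all_goals first
  | (simp only [pvWT, List.map_cons, List.sum_cons, List.length_cons, List.length_nil]
     exact Prod.Lex.left _ _ (by omega))
  | (simp only [pvWT, List.map_cons, List.sum_cons, List.length_cons]
     have := pvWG_erase_getD_le st.g p
     exact Prod.Lex.left _ _ (by omega))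
  | (apply Prod.Lex.right' <;> simp [pvWT])

-- the fuel handed to innerAF is sufficient: it computes innerR
theorem pvInnerAF_eq (fuel : Nat) : ∀ (st : LoopSt) (tr : List (Int × Int × List Int)),
    pvMI st tr < fuel → innerAF fuel st tr = innerR st tr := by
  induction fuel with
  | zero => intro st tr h; omega
  | succ f ih =>
    intro st tr h
    rcases tr with _ | ⟨⟨i, l, s⟩, rest⟩
    · rw [innerAF.eq_def, innerR.eq_def]
    · rcases s with _ | ⟨p, s'⟩ <;> rw [innerAF.eq_def, innerR.eq_def] <;> simp only []
      · rcases hL : st.loopL with _ | ⟨b, loopRest⟩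
        · rcases rest with _ | ⟨⟨q, ql, qs⟩, rtail⟩ <;>
            (apply ih; simp only [pvMI, pvWT, List.map_cons, List.sum_cons, List.length_cons,
              List.length_nil] at h ⊢; omega)
        · by_cases hlt : b < l
          · simp only [if_pos hlt]
            rcases rest with _ | ⟨⟨q, ql, qs⟩, rtail⟩ <;>
              (apply ih; simp only [pvMI, pvWT, List.map_cons, List.sum_cons, List.length_cons,
                List.length_nil] at h ⊢; omega)
          · simp only [if_neg hlt]
            rcases rest with _ | ⟨⟨q, ql, qs⟩, rtail⟩ <;>
              (apply ih; simp only [pvMI, pvWT, List.map_cons, List.sum_cons, List.length_cons,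
                List.length_nil] at h ⊢; omega)
      · by_cases hs : st.seen.contains p
        · simp only [hs, if_true]
          apply ih
          simp only [pvMI, pvWT, List.map_cons, List.sum_cons, List.length_cons] at h ⊢
          omega
        · simp only [hs, Bool.false_eq_true, if_false]
          by_cases hz : st.sizes.contains p
          · simp only [hz, if_true]
            apply ih
            simp only [pvMI, pvWT, List.map_cons, List.sum_cons, List.length_cons,
              List.length_nil] at h ⊢
            omega
          · simp only [hz, Bool.false_eq_true, if_false]
            apply ih
            have := pvWG_erase_getD_le st.g p
            simp only [pvMI, pvWT, List.map_cons, List.sum_cons, List.length_cons] at h ⊢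
            omega

theorem pvEpilogueB_g (base : Int) (st : LoopSt) : (epilogueB base st).g = st.g := by
  unfold epilogueB
  rcases st.loopL with _ | ⟨b, r⟩ <;> simp only [] <;> split <;> rfl

theorem pvWG_erase_le (d : PySem.Dict Int (List Int)) (p : Int) : pvWG (d.erase p) ≤ pvWG d := by
  have := pvWG_erase_getD_le d p
  omega

theorem pvMono_dfsB (fuel : Nat) :
    (∀ st v es, pvWG (dfsB fuel st v es).g ≤ pvWG st.g ∧ (dfsB fuel st v es).g.size ≤ st.g.size) ∧
    (∀ st v es, pvWG (goB fuel st v es).g ≤ pvWG st.g ∧ (goB fuel st v es).g.size ≤ st.g.size) := by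
  induction fuel with
  | zero =>
    constructor <;> intro st v es <;> simp [dfsB, goB]
  | succ f ih =>
    obtain ⟨ihd, ihg⟩ := ih
    constructor
    · intro st v es
      have hg := ihg (pushNode st v) v es
      rw [dfsB, pvEpilogueB_g]
      have hpush : (pushNode st v).g = st.g := rfl
      rw [hpush] at hg
      exact hg
    · intro st v es
      cases es with
      | nil => simp [goB]
      | cons p rest =>
        rw [goB]
        by_cases hs : st.seen.contains p
        · simp only [hs, if_true]
          exact ihg _ v rest
        · simp only [hs, Bool.false_eq_true, if_false]
          by_cases hz : st.sizes.contains p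
          · simp only [hz, if_true]
            exact ihg { st with sizes := st.sizes.insert v (max (st.sizes.getD v 0) (st.sizes.getD p 0)) } v rest
          · simp only [hz, Bool.false_eq_true, if_false]
            have h1 := ihd { st with g := st.g.erase p } p (st.g.getD p [])
            have h2 := ihg { dfsB f { st with g := st.g.erase p } p (st.g.getD p []) with
              sizes := (dfsB f { st with g := st.g.erase p } p (st.g.getD p [])).sizes.insert v
                (max ((dfsB f { st with g := st.g.erase p } p (st.g.getD p [])).sizes.getD v 0)
                     ((dfsB f { st with g := st.g.erase p } p (st.g.getD p [])).sizes.getD p 0)) } v rest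
            have h3 := pvWG_erase_le st.g p
            have h4 := pvSizeErase_le st.g p
            simp only [] at h1 h2 ⊢
            constructor
            · exact le_trans h2.1 (le_trans h1.1 h3)
            · exact le_trans h2.2 (le_trans h1.2 h4)


-- A's parent-size update after a traversal entry is popped
def parentUpd (st : LoopSt) (v : Int) (rest : List (Int × Int × List Int)) : LoopSt :=
  match rest with
  | [] => st
  | (q, _, _) :: _ =>
    { st with sizes := st.sizes.insert q (max (st.sizes.getD q 0) (st.sizes.getD v 0)) }

theorem pvPopLoop_suffix (i : Int) (L : List Int) : (popLoop i L).IsSuffix L := by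
  induction L with
  | nil => simp [popLoop]
  | cons b r ih =>
    rw [popLoop]
    split
    · exact ih.trans (List.suffix_cons b r)
    · exact List.suffix_refl _

theorem pvGetD_foldl_insert_not_mem (L : List Int) (d : PySem.Dict Int Int) (x sz : Int)
    (hx : x ∉ L) : ((L.foldl (fun d j => d.insert j sz) d)).getD x 0 = d.getD x 0 := by
  induction L generalizing d with
  | nil => rfl
  | cons j t ih =>
    simp only [List.foldl_cons]
    rw [ih _ (fun h => hx (List.mem_cons_of_mem _ h))]
    rw [PySem.Dict.getD_insert]
    have : ¬ x = j := fun h => hx (by simp [h])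
    simp only [if_neg this]

theorem pvGetD_foldl_insert_mem (L : List Int) (d : PySem.Dict Int Int) (x sz : Int)
    (hx : x ∈ L) : ((L.foldl (fun d j => d.insert j sz) d)).getD x 0 = sz := by
  induction L generalizing d with
  | nil => cases hx
  | cons j t ih =>
    simp only [List.foldl_cons]
    by_cases ht : x ∈ t
    · exact ih _ ht
    · have hxj : x = j := by
        rcases List.mem_cons.mp hx with h | h
        · exact h
        · exact absurd h ht
      subst hxj
      rw [pvGetD_foldl_insert_not_mem _ _ _ _ ht, PySem.Dict.getD_insert]
      simp

theorem pvEpi (st : LoopSt) (v : Int) (rest : List (Int × Int × List Int)) (P extra : List Int)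
    (hstack : st.stack = P ++ v :: extra)
    (hloop : ∀ x ∈ st.loopL, 0 ≤ x ∧ x ≤ (P.length : Int)) :
    innerR st ((v, (P.length : Int), []) :: rest) =
      innerR (parentUpd (epilogueB (P.length : Int) st) v rest) rest := by
  obtain ⟨g0, seen0, stack0, L0, sizes0⟩ := st
  simp only [] at hstack hloop
  subst hstack
  rw [innerR.eq_def]
  simp only []
  cases L0 with
  | nil =>
    simp only [epilogueB]
    cases rest with
    | nil => rfl
    | cons r rtail => rcases r with ⟨q, ql, qs⟩; rfl
  | cons b loopRest =>
    obtain ⟨hb0, hble⟩ := hloop b List.mem_cons_self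
    simp only [epilogueB]
    by_cases hlt : b < (P.length : Int)
    · have hne : (b == (P.length : Int)) = false := by
        simp only [beq_eq_false_iff_ne]; omega
      simp only [if_pos hlt, hne, Bool.false_eq_true, if_false]
      cases rest with
      | nil => rfl
      | cons r rtail => rcases r with ⟨q, ql, qs⟩; rfl
    · have hbeq : b = (P.length : Int) := by omega
      have heq : (b == (P.length : Int)) = true := by simp [hbeq]
      have htn : b.toNat = P.length := by omega
      have hdrop : (P ++ v :: extra).drop b.toNat = v :: extra := by
        rw [htn, List.drop_left' rfl]
      have htake : (P ++ v :: extra).take b.toNat = P := by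
        rw [htn, List.take_left' rfl]
      simp only [if_neg hlt, heq, if_true]
      cases rest with
      | nil =>
        simp only [parentUpd, hdrop, htake]
      | cons r rtail =>
        rcases r with ⟨q, ql, qs⟩
        simp only [parentUpd, hdrop, htake]
        rw [pvGetD_foldl_insert_mem (v :: extra) _ v _ List.mem_cons_self]

-- The simulation: running A's machine on one traversal entry (v, l, es) on top computes
-- exactly B's dfs/edge-loop on (v, es) followed by A's parent-size update.
theorem pvSim (fuel : Nat) :
    (∀ st v es rest,
      2 * pvWG st.g + 2 * st.g.size + 2 * es.length + 1 ≤ fuel →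
      (∀ x ∈ st.loopL, 0 ≤ x ∧ x < (st.stack.length : Int)) →
      (innerR (pushNode st v) ((v, (st.stack.length : Int), es) :: rest)
          = innerR (parentUpd (dfsB fuel st v es) v rest) rest
        ∧ (∃ t, (dfsB fuel st v es).stack = st.stack ++ t)
        ∧ (dfsB fuel st v es).loopL.IsSuffix st.loopL))
    ∧
    (∀ st v es rest P extra,
      2 * pvWG st.g + 2 * st.g.size + 2 * es.length ≤ fuel →
      st.stack = P ++ v :: extra →
      (∀ x ∈ st.loopL, 0 ≤ x ∧ x ≤ (P.length : Int)) →
      (innerR st ((v, (P.length : Int), es) :: rest)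
          = innerR (parentUpd (epilogueB (P.length : Int) (goB fuel st v es)) v rest) rest
        ∧ (∃ extra', (goB fuel st v es).stack = P ++ v :: extra')
        ∧ (goB fuel st v es).loopL.IsSuffix st.loopL)) := by
  induction fuel with
  | zero =>
    constructor
    · intro st v es rest hfuel hloop
      omega
    · intro st v es rest P extra hfuel hstack hloop
      cases es with
      | cons p es' => simp only [List.length_cons] at hfuel; omega
      | nil =>
        refine ⟨pvEpi st v rest P extra hstack hloop, ⟨extra, hstack⟩, List.suffix_refl _⟩
  | succ f ih =>
    obtain ⟨ihd, ihg⟩ := ih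
    have goNil : ∀ (fl : Nat) st (v : Int), goB fl st v [] = st := by
      intro fl st v; cases fl <;> rfl
    constructor
    · -- dfs part at f+1
      intro st v es rest hfuel hloop
      have hstackP : (pushNode st v).stack = st.stack ++ v :: [] := rfl
      have hloopP : ∀ x ∈ (pushNode st v).loopL, 0 ≤ x ∧ x ≤ (st.stack.length : Int) := by
        intro x hx
        rcases List.mem_cons.mp hx with h | h
        · subst h; constructor <;> simp
        · have := hloop x h; omega
      have hfuelP : 2 * pvWG (pushNode st v).g + 2 * (pushNode st v).g.size + 2 * es.length ≤ f := by
        have : (pushNode st v).g = st.g := rfl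
        rw [this]; omega
      obtain ⟨hG1, ⟨extra', hG2⟩, hG3⟩ := ihg (pushNode st v) v es rest st.stack [] hfuelP hstackP hloopP
      have hdfs : dfsB (f + 1) st v es
          = epilogueB (st.stack.length : Int) (goB f (pushNode st v) v es) := rfl
      refine ⟨?_, ?_, ?_⟩
      · rw [hdfs]; exact hG1
      · rw [hdfs]
        rcases hGL : (goB f (pushNode st v) v es).loopL with _ | ⟨b, r⟩
        · rw [epilogueB, hGL]
          exact ⟨v :: extra', hG2⟩
        · rw [epilogueB, hGL]
          rcases List.suffix_cons_iff.mp (hGL ▸ hG3) with hw | hsuf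
        -- pushNode's loopL is (st.stack.length) :: st.loopL
          · obtain ⟨hb, hr⟩ : b = (st.stack.length : Int) ∧ r = st.loopL := by
              have : b :: r = (st.stack.length : Int) :: st.loopL := hw
              exact ⟨by injection this, by injection this⟩
            have heq : (b == (st.stack.length : Int)) = true := by simp [hb]
            simp only [heq, if_true]
            refine ⟨[], ?_⟩
            have htn : b.toNat = st.stack.length := by omega
            rw [hG2, htn, List.take_left' rfl, List.append_nil]
          · have hb : b < (st.stack.length : Int) := (hloop b (hsuf.subset List.mem_cons_self)).2
            have hne : (b == (st.stack.length : Int)) = false := by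
              simp only [beq_eq_false_iff_ne]; omega
            simp only [hne, Bool.false_eq_true, if_false]
            exact ⟨v :: extra', hG2⟩
      · rw [hdfs]
        rcases hGL : (goB f (pushNode st v) v es).loopL with _ | ⟨b, r⟩
        · rw [epilogueB, hGL]; rw [hGL]; exact List.nil_suffix
        · rw [epilogueB, hGL]
          rcases List.suffix_cons_iff.mp (hGL ▸ hG3) with hw | hsuf
          · obtain ⟨hb, hr⟩ : b = (st.stack.length : Int) ∧ r = st.loopL := by
              have : b :: r = (st.stack.length : Int) :: st.loopL := hw
              exact ⟨by injection this, by injection this⟩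
            have heq : (b == (st.stack.length : Int)) = true := by simp [hb]
            simp only [heq, if_true]
            rw [hr]
          · have hb : b < (st.stack.length : Int) := (hloop b (hsuf.subset List.mem_cons_self)).2
            have hne : (b == (st.stack.length : Int)) = false := by
              simp only [beq_eq_false_iff_ne]; omega
            simp only [hne, Bool.false_eq_true, if_false]
            exact hGL ▸ hsuf
    · -- go part at f+1
      intro st v es rest P extra hfuel hstack hloop
      cases es with
      | nil =>
        rw [goNil]
        exact ⟨pvEpi st v rest P extra hstack hloop, ⟨extra, hstack⟩, List.suffix_refl _⟩
      | cons p es' =>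
        rw [goB]
        by_cases hs : st.seen.contains p
        · simp only [hs, if_true]
          have h1 : innerR st ((v, (P.length : Int), p :: es') :: rest)
              = innerR { st with loopL := popLoop (st.seen.getD p 0) st.loopL }
                  ((v, (P.length : Int), es') :: rest) := by
            rw [innerR.eq_def]
            simp only [hs, if_true]
          rw [h1]
          have hloop' : ∀ x ∈ (popLoop (st.seen.getD p 0) st.loopL), 0 ≤ x ∧ x ≤ (P.length : Int) :=
            fun x hx => hloop x ((pvPopLoop_suffix _ _).subset hx)
          have hfuel' : 2 * pvWG st.g + 2 * st.g.size + 2 * es'.length ≤ f := by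
            simp only [List.length_cons] at hfuel; omega
          obtain ⟨g1, g2, g3⟩ := ihg { st with loopL := popLoop (st.seen.getD p 0) st.loopL }
            v es' rest P extra hfuel' hstack hloop'
          exact ⟨g1, g2, g3.trans (pvPopLoop_suffix _ _)⟩
        · simp only [hs, Bool.false_eq_true, if_false]
          by_cases hz : st.sizes.contains p
          · simp only [hz, if_true]
            -- the dummy (p, loop[-1]+1, set()) entry: two machine steps
            have h1 : innerR st ((v, (P.length : Int), p :: es') :: rest)
                = innerR st ((p, st.loopL.headD 0 + 1, ([] : List Int))
                    :: (v, (P.length : Int), es') :: rest) := by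
              rw [innerR.eq_def]
              simp only [hs, Bool.false_eq_true, if_false, hz, if_true]
            have h2 : innerR st ((p, st.loopL.headD 0 + 1, ([] : List Int))
                    :: (v, (P.length : Int), es') :: rest)
                = innerR { st with sizes := st.sizes.insert v (max (st.sizes.getD v 0) (st.sizes.getD p 0)) } ((v, (P.length : Int), es') :: rest) := by
              rw [innerR.eq_def]
              rcases hL : st.loopL with _ | ⟨b, r⟩
              · simp only []
              · have : b < b + 1 := by omega
                simp only [List.headD_cons, if_pos this]
            rw [h1, h2]
            have hfuel' : 2 * pvWG st.g + 2 * st.g.size + 2 * es'.length ≤ f := by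
              simp only [List.length_cons] at hfuel; omega
            exact ihg _ v es' rest P extra hfuel' hstack hloop
          · simp only [hz, Bool.false_eq_true, if_false]
            -- recurse into p
            have h1 : innerR st ((v, (P.length : Int), p :: es') :: rest)
                = innerR (pushNode { st with g := st.g.erase p } p)
                    ((p, (st.stack.length : Int), st.g.getD p [])
                      :: (v, (P.length : Int), es') :: rest) := by
              rw [innerR.eq_def]
              simp only [hs, Bool.false_eq_true, if_false, hz, if_true]
              rfl
            rw [h1]
            have hWe := pvWG_erase_getD_le st.g p
            have hSe := pvSizeErase_le st.g p
            have hfuelD : 2 * pvWG ({ st with g := st.g.erase p } : LoopSt).g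
                + 2 * ({ st with g := st.g.erase p } : LoopSt).g.size
                + 2 * (st.g.getD p []).length + 1 ≤ f := by
              simp only [List.length_cons] at hfuel
              simp only []
              omega
            have hloopD : ∀ x ∈ ({ st with g := st.g.erase p } : LoopSt).loopL,
                0 ≤ x ∧ x < (({ st with g := st.g.erase p } : LoopSt).stack.length : Int) := by
              intro x hx
              have := hloop x hx
              have : (P.length : Int) < (st.stack.length : Int) := by
                rw [hstack]
                simp only [List.length_append, List.length_cons]
                push_cast
                omega
              have := hloop x hx
              simp only []
              omega
            obtain ⟨d1, ⟨t, d2⟩, d3⟩ := ihd { st with g := st.g.erase p } p (st.g.getD p [])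
              ((v, (P.length : Int), es') :: rest) hfuelD hloopD
            rw [d1]
            set D := dfsB f { st with g := st.g.erase p } p (st.g.getD p []) with hD
            have h3 : parentUpd D p ((v, (P.length : Int), es') :: rest)
                = { D with sizes := D.sizes.insert v (max (D.sizes.getD v 0) (D.sizes.getD p 0)) } := rfl
            rw [h3]
            set stU := { D with sizes := D.sizes.insert v (max (D.sizes.getD v 0) (D.sizes.getD p 0)) } with hstU
            have hstack' : stU.stack = P ++ v :: (extra ++ t) := by
              rw [hstU]
              simp only []
              rw [d2]
              simp only []
              rw [hstack, List.append_assoc, List.cons_append]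
            have hloop' : ∀ x ∈ stU.loopL, 0 ≤ x ∧ x ≤ (P.length : Int) := by
              intro x hx
              exact hloop x (d3.subset hx)
            have hMono := (pvMono_dfsB f).1 { st with g := st.g.erase p } p (st.g.getD p [])
            have hfuel' : 2 * pvWG stU.g + 2 * stU.g.size + 2 * es'.length ≤ f := by
              have hU : stU.g = D.g := rfl
              have h5 : pvWG D.g ≤ pvWG (st.g.erase p) := hMono.1
              have h6 : D.g.size ≤ (st.g.erase p).size := hMono.2
              have h7 := pvWG_erase_le st.g p
              simp only [List.length_cons] at hfuel
              rw [hU]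
              omega
            obtain ⟨g1, g2, g3⟩ := ihg stU v es' rest P (extra ++ t) hfuel' hstack' hloop'
            refine ⟨g1, g2, ?_⟩
            have : stU.loopL = D.loopL := rfl
            exact g3.trans (this ▸ d3)

theorem pvGetD_head (d : PySem.Dict Int (List Int)) (p : Int) (es : List Int)
    (t : List (Int × List Int)) (h : d.items = (p, es) :: t) : d.getD p [] = es := by
  simp [PySem.Dict.getD, PySem.Dict.get?, h]

theorem pvSizeErase_lt (d : PySem.Dict Int (List Int)) (p : Int) (es : List Int)
    (t : List (Int × List Int)) (h : d.items = (p, es) :: t) : (d.erase p).size < d.size := by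
  show (List.filter _ d.items).length < d.items.length
  rw [h, List.filter_cons]
  simp only [beq_self_eq_true, Bool.not_true, Bool.false_eq_true, if_false, List.length_cons]
  exact Nat.lt_succ_of_le (List.length_filter_le _ _)

def pushFrameA (st : LoopSt) (p : Int) : LoopSt :=
  { st with g := st.g.erase p, seen := st.seen.insert p (st.stack.length : Int), stack := st.stack ++ [p], loopL := (st.stack.length : Int) :: st.loopL, sizes := st.sizes.insert p 0 }

theorem pvOuterEq : ∀ (n : Nat) (st : LoopSt), st.g.size ≤ n →
    (∀ x ∈ st.loopL, 0 ≤ x ∧ x < (st.stack.length : Int)) → outerAF n st = outerBF n st := by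
  intro n
  induction n with
  | zero => intro st _ _; rfl
  | succ n ihn =>
    intro st hsz hloop
    rw [outerAF, outerBF]
    rcases hitems : st.g.items with _ | ⟨⟨p, es⟩, t⟩
    · rfl
    · simp only []
      have hgetD : st.g.getD p [] = es := pvGetD_head st.g p es t hitems
      have hlt := pvSizeErase_lt st.g p es t hitems
      have hWe := pvWG_erase_getD_le st.g p
      rw [pvInnerAF_eq _ _ _ (Nat.lt_succ_self _)]
      set F := 2 * pvWG st.g + 2 * st.g.size with hF
      have hfuelD : 2 * pvWG ({ st with g := st.g.erase p } : LoopSt).g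
          + 2 * ({ st with g := st.g.erase p } : LoopSt).g.size + 2 * es.length + 1 ≤ F := by
        simp only []
        rw [← hgetD]
        omega
      have hloopD : ∀ x ∈ ({ st with g := st.g.erase p } : LoopSt).loopL,
          0 ≤ x ∧ x < (({ st with g := st.g.erase p } : LoopSt).stack.length : Int) := hloop
      obtain ⟨d1, ⟨tl, d2⟩, d3⟩ := (pvSim F).1 { st with g := st.g.erase p } p es [] hfuelD hloopD
      have hrecord : innerR (pushFrameA st p) [(p, (st.stack.length : Int), es)]
          = dfsB F { st with g := st.g.erase p } p es := by
        have := d1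
        simp only [parentUpd, innerR] at this
        exact this
      rw [show ({ st with g := st.g.erase p,
                          seen := st.seen.insert p (st.stack.length : Int),
                          stack := st.stack ++ [p],
                          loopL := (st.stack.length : Int) :: st.loopL,
                          sizes := st.sizes.insert p 0 } : LoopSt) = pushFrameA st p from rfl, hrecord]
      set D := dfsB F { st with g := st.g.erase p } p es with hD
      have hMono := (pvMono_dfsB F).1 { st with g := st.g.erase p } p es
      apply ihn D
      · have h6 : D.g.size ≤ (st.g.erase p).size := hMono.2
        omega
      · intro x hx
        have hmem : x ∈ st.loopL := d3.subset hx
        have := hloop x hmem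
        have hlen : (st.stack.length : Int) ≤ (D.stack.length : Int) := by
          rw [d2]
          simp only [List.length_append]
          push_cast
          omega
        omega

theorem loops_main (g : List (Int × List Int)) : loops g = loops_alt g := by
  unfold loops loops_alt
  rw [pvOuterEq (pvGraphOf g).size ⟨pvGraphOf g, PySem.Dict.empty, [], [], PySem.Dict.empty⟩
    (Nat.le_refl _) (by intro x hx; cases hx)]

-- ===== VERDICT (by name: the statement is the Claim_ definition above) =====
theorem loops_spec : Claim_equal_loops := by
  intro g _ _
  exact loops_main g
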